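-- pv_equiv track=rewrite | github.com/guodongsanjianke/Combinatorial_Ski_Rental_Problems | LA-SOAC_sup materical/main_average_competitive_ratio.py | generate_replacements
-- ===== SOURCE A (Python) =====
-- def generate_replacements(sequence, combinations_to_replace):
--     def is_replaceable(subseq, combination):
--         return all((x,) in subseq for x in combination)
--     def replace(subseq, combination):
--         new_seq = [x for x in subseq if x not in [(y,) for y in combination]]
--         new_seq.append(tuple(combination))
--         return new_seq
--     def backtrack(subseq, remaining_combinations, results):
--         if not remaining_combinations:
--             results.append(subseq)
--             return
--         current_combination = remaining_combinations[0]
--         next_combinations = remaining_combinations[1:]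
--         backtrack(subseq, next_combinations, results)
--         if is_replaceable(subseq, current_combination):
--             replaced_seq = replace(subseq, current_combination)
--             backtrack(replaced_seq, next_combinations, results)
--     results = []
--     backtrack(sequence, combinations_to_replace, results)
--     return results
-- ===== SOURCE B (Python) =====
-- def generate_replacements(sequence, combinations_to_replace):
--     # Level-by-level expansion: fold each combination over a frontier of
--     # partial results; each subseq emits itself and (if replaceable) its
--     # replaced version, which reproduces the DFS skip-before-apply order.
--     frontier = [sequence]
--     for combination in combinations_to_replace:
--         targets = [(y,) for y in combination]
--         nxt = []
--         for s in frontier: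
--             nxt.append(s)
--             if all(t in s for t in targets):
--                 nxt.append([x for x in s if x not in targets] + [tuple(combination)])
--         frontier = nxt
--     return frontier
-- ===== Notes on version B (the rewrite author's own statement) =====
-- stated objective: alternative
-- what changed: A's binary backtracking recursion (skip/apply each combination, mutating a shared results list) is replaced by a single iterative fold that expands a frontier of partial results one combination at a time, each subsequence emitting itself and, if replaceable, its replaced version.
import Mathlib
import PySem

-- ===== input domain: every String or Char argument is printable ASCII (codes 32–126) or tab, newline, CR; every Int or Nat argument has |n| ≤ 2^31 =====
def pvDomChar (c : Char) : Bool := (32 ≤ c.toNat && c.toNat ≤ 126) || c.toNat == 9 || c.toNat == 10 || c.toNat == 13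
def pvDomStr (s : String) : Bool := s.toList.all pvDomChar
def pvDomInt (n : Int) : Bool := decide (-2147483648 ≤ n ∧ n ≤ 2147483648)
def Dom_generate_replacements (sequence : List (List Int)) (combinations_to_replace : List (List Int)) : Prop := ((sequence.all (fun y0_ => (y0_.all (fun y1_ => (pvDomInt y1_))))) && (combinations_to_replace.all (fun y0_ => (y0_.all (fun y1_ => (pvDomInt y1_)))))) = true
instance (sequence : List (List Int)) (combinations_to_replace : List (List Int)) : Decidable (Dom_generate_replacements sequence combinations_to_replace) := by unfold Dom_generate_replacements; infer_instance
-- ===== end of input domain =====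

-- B replaces A's binary recursion by a single fold that expands a frontier of
-- partial results one combination at a time (objective: simpler decomposition).

-- ===== PORT A =====
-- is_replaceable(subseq, combination)
def pvIsReplaceable (subseq : List (List Int)) (combination : List Int) : Bool :=
  combination.all (fun x => subseq.contains [x])

-- replace(subseq, combination)
def pvReplace (subseq : List (List Int)) (combination : List Int) : List (List Int) :=
  (subseq.filter (fun x => !((combination.map (fun y => [y])).contains x))) ++ [combination]

-- backtrack(subseq, remaining_combinations, results): results is threaded as an
-- accumulator and returned (Python mutates the shared list in place).
def pvBacktrack (subseq : List (List Int)) (rem : List (List Int))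
    (results : List (List (List Int))) : List (List (List Int)) :=
  match rem with
  | [] => results ++ [subseq]
  | c :: rest =>
    let r1 := pvBacktrack subseq rest results
    if pvIsReplaceable subseq c then
      pvBacktrack (pvReplace subseq c) rest r1
    else r1

def generate_replacements (sequence : List (List Int)) (combinations_to_replace : List (List Int)) : List (List (List Int)) :=
  pvBacktrack sequence combinations_to_replace []

-- ===== PORT B =====
-- inner loop of Source B: for s in frontier: append s; maybe append its replacement
def pvExpandStep (combination : List Int) (nxt : List (List (List Int)))
    (s : List (List Int)) : List (List (List Int)) :=
  let targets := combination.map (fun y => [y])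
  let nxt' := nxt ++ [s]
  if targets.all (fun t => s.contains t) then
    nxt' ++ [(s.filter (fun x => !(targets.contains x))) ++ [combination]]
  else nxt'

def generate_replacements_alt (sequence : List (List Int)) (combinations_to_replace : List (List Int)) : List (List (List Int)) :=
  combinations_to_replace.foldl
    (fun frontier combination => frontier.foldl (pvExpandStep combination) [])
    [sequence]

-- ===== PRECONDITION & SPEC =====
def Spec_generate_replacements (sequence : List (List Int)) (combinations_to_replace : List (List Int)) (out : List (List (List Int))) : Prop := out = generate_replacements_alt sequence combinations_to_replace
instance (sequence : List (List Int)) (combinations_to_replace : List (List Int)) (out : List (List (List Int))) : Decidable (Spec_generate_replacements sequence combinations_to_replace out) := by unfold Spec_generate_replacements; infer_instance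

-- ===== CLAIM (what is proved, stated in full; the proofs are below) =====
def Claim_equal_generate_replacements : Prop := ∀ (sequence : List (List Int)) (combinations_to_replace : List (List Int)), Dom_generate_replacements sequence combinations_to_replace → Spec_generate_replacements sequence combinations_to_replace (generate_replacements sequence combinations_to_replace)

-- ===== LEMMAS AND PROOFS =====

-- the accumulator is only ever appended to
theorem pvBacktrack_append (subseq : List (List Int)) (rem : List (List Int))
    (results : List (List (List Int))) :
    pvBacktrack subseq rem results = results ++ pvBacktrack subseq rem [] := by
  induction rem generalizing subseq results with
  | nil => simp [pvBacktrack]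
  | cons c rest ih =>
    simp only [pvBacktrack]
    by_cases h : pvIsReplaceable subseq c = true
    · simp only [h, if_true]
      rw [ih subseq results, ih (pvReplace subseq c) (results ++ pvBacktrack subseq rest []),
          ih (pvReplace subseq c) (pvBacktrack subseq rest [])]
      simp
    · simp only [h]
      exact ih subseq results

-- the list the one-combination expansion emits for a single subseq
def pvEmit (c : List Int) (s : List (List Int)) : List (List (List Int)) :=
  s :: (if pvIsReplaceable s c then [pvReplace s c] else [])

theorem pvExpandStep_emit (c : List Int) (nxt : List (List (List Int))) (s : List (List Int)) :
    pvExpandStep c nxt s = nxt ++ pvEmit c s := by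
  by_cases h : ∀ x ∈ c, [x] ∈ s
  · simp [pvExpandStep, pvEmit, pvIsReplaceable, pvReplace, if_pos h]
  · simp [pvExpandStep, pvEmit, pvIsReplaceable, pvReplace, if_neg h]

theorem pvFoldl_expand (c : List Int) (frontier acc : List (List (List Int))) :
    frontier.foldl (pvExpandStep c) acc = acc ++ frontier.flatMap (pvEmit c) := by
  induction frontier generalizing acc with
  | nil => simp
  | cons s rest ih => simp [List.foldl_cons, pvExpandStep_emit, ih]

-- main invariant: folding the combinations over a frontier is the concatenation
-- of the DFS results of each frontier element
theorem pvFold_flatMap (cs : List (List Int)) (F : List (List (List Int))) :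
    cs.foldl (fun frontier combination => frontier.foldl (pvExpandStep combination) []) F
      = F.flatMap (fun s => pvBacktrack s cs []) := by
  induction cs generalizing F with
  | nil => simp [pvBacktrack]
  | cons c rest ih =>
    simp only [List.foldl_cons]
    rw [pvFoldl_expand, List.nil_append, ih, List.flatMap_assoc]
    apply List.flatMap_congr
    intro s _
    simp only [pvEmit, pvBacktrack]
    by_cases h : pvIsReplaceable s c = true
    · simp [h, pvBacktrack_append (pvReplace s c) rest (pvBacktrack s rest [])]
    · simp [h]

-- ===== VERDICT (by name: the statement is the Claim_ definition above) =====
theorem generate_replacements_spec : Claim_equal_generate_replacements := by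
  intro sequence combos _
  unfold Spec_generate_replacements generate_replacements generate_replacements_alt
  rw [pvFold_flatMap]
  simp
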